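-- pv_equiv track=rewrite | github.com/land-boards/lb-Python-Code | AoC/AoC-2020/D20/D20P2.py | edgeValRightToLeft
-- ===== SOURCE A (Python) =====
-- def edgeValRightToLeft(inListTopRow):
-- 	checkBitVal = 2**(len(inListTopRow)-1)
-- 	accumVal = 0
-- 	for cellVal in inListTopRow:
-- 		if cellVal == '#':
-- 			accumVal += checkBitVal
-- 		checkBitVal >>= 1
-- 	return accumVal
-- ===== SOURCE B (Python) =====
-- def edgeValRightToLeft(inListTopRow):
-- 	if not inListTopRow:
-- 		return 0
-- 	binstr = ''.join('1' if cellVal == '#' else '0' for cellVal in inListTopRow)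
-- 	return int(binstr, 2)
-- ===== Notes on version B (the rewrite author's own statement) =====
-- stated objective: idiomatic
-- what changed: Replaces the manual descending bit-weight accumulation with a representation transform: map each cell to a '0'/'1' character, join into a binary string, and parse it with int(binstr, 2) (empty list returns 0, matching A's vacuous loop).
import Mathlib
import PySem

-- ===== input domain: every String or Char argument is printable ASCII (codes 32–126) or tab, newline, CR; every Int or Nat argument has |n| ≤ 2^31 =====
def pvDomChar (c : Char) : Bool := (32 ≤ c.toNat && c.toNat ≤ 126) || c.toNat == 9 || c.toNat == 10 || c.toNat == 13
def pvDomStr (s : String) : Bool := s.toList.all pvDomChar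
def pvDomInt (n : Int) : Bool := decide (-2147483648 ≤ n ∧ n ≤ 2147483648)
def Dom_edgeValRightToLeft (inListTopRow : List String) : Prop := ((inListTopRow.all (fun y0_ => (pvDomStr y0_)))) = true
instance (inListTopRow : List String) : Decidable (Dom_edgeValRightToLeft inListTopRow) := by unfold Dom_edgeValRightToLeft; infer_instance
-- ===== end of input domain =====

-- B replaces A's manual descending bit-weight accumulation by a representation transform:
-- map cells to a '0'/'1' binary string and parse it in base 2 (0 for the empty list).

-- ===== PORT A =====
-- A keeps (accumVal, checkBitVal); checkBitVal starts at 2**(len-1) and is shifted right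
-- each step ('>> 1' = floor division by 2). For the empty list Python's 2**(-1) is a float,
-- but the loop is vacuous and that value is never used (A returns the int 0); the port's
-- initial weight 2^(0-1) = 2^0 is likewise unused there.
def edgeValRightToLeft (inListTopRow : List String) : Int :=
  (inListTopRow.foldl
    (fun st cellVal =>
      ((if cellVal == "#" then st.1 + st.2 else st.1), PySem.Int.floordiv st.2 2))
    (0, (2 : Int) ^ (inListTopRow.length - 1))).1

-- ===== PORT B =====
-- hand port of Python's int(s, 2) on a string of '0'/'1' characters (exact there)
def pvParseBin (cs : List Char) : Int :=
  cs.foldl (fun a c => a * 2 + (if c = '1' then 1 else 0)) 0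

def edgeValRightToLeft_alt (inListTopRow : List String) : Int :=
  if inListTopRow = [] then 0
  else
    pvParseBin (inListTopRow.map (fun cellVal => if cellVal == "#" then '1' else '0'))

-- ===== PRECONDITION & SPEC =====
def Spec_edgeValRightToLeft (inListTopRow : List String) (out : Int) : Prop := out = edgeValRightToLeft_alt inListTopRow
instance (inListTopRow : List String) (out : Int) : Decidable (Spec_edgeValRightToLeft inListTopRow out) := by unfold Spec_edgeValRightToLeft; infer_instance

-- ===== CLAIM (what is proved, stated in full; the proofs are below) =====
def Claim_equal_edgeValRightToLeft : Prop := ∀ (inListTopRow : List String), Dom_edgeValRightToLeft inListTopRow → Spec_edgeValRightToLeft inListTopRow (edgeValRightToLeft inListTopRow)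

-- ===== LEMMAS AND PROOFS =====

-- B's parse of the mapped bit string is a Horner fold directly over the cells.
theorem parse_map (xs : List String) (a : Int) :
    (xs.map (fun cellVal => if cellVal == "#" then '1' else '0')).foldl
      (fun a c => a * 2 + (if c = '1' then 1 else 0)) a
    = xs.foldl (fun a s => a * 2 + (if s == "#" then 1 else 0)) a := by
  induction xs generalizing a with
  | nil => rfl
  | cons c t ih =>
    simp only [List.map_cons, List.foldl_cons]
    rw [ih]
    by_cases hc : c == "#" <;> simp [hc]

-- The Horner fold started at a equals a shifted past the list plus the fold from 0.
theorem horner_fold_shift (xs : List String) (a : Int) :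
    xs.foldl (fun a s => a * 2 + (if s == "#" then 1 else 0)) a
      = a * 2 ^ xs.length
        + xs.foldl (fun a s => a * 2 + (if s == "#" then 1 else 0)) 0 := by
  induction xs generalizing a with
  | nil => simp
  | cons c t ih =>
    simp only [List.foldl_cons, List.length_cons]
    rw [ih, ih (0 * 2 + _)]
    ring

theorem pow_floordiv_two (k : Nat) :
    PySem.Int.floordiv ((2 : Int) ^ (k + 1)) 2 = (2 : Int) ^ k := by
  rw [PySem.Int.floordiv_eq_ediv_of_pos (by norm_num), pow_succ]
  exact Int.mul_ediv_cancel _ (by norm_num)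

-- A's fold, started with weight 2^k where the list fits (len ≤ k+1), yields the
-- accumulator plus the Horner value scaled by the weight of the last consumed bit.
theorem a_fold_eq (xs : List String) (a : Int) (k : Nat) (h : xs.length ≤ k + 1) :
    (xs.foldl
      (fun st cellVal =>
        ((if cellVal == "#" then st.1 + st.2 else st.1), PySem.Int.floordiv st.2 2))
      (a, (2 : Int) ^ k)).1
    = a + (2 : Int) ^ (k + 1 - xs.length)
        * xs.foldl (fun a s => a * 2 + (if s == "#" then 1 else 0)) 0 := by
  induction xs generalizing a k with
  | nil => simp
  | cons c t ih =>
    simp only [List.foldl_cons, List.length_cons]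
    cases k with
    | zero =>
      have ht : t = [] := by
        cases t with
        | nil => rfl
        | cons _ _ => simp at h
      subst ht
      simp only [List.foldl_nil]
      by_cases hc : c == "#" <;> simp [hc]
    | succ k =>
      rw [pow_floordiv_two]
      rw [ih _ _ (by simpa using h)]
      rw [horner_fold_shift t (0 * 2 + _)]
      have hlen : t.length ≤ k + 1 := by simpa using h
      have hexp : k + 1 + 1 - (t.length + 1) = k + 1 - t.length := by omega
      have hpow : (2 : Int) ^ (k + 1 - t.length) * 2 ^ t.length = 2 ^ (k + 1) := by
        rw [← pow_add]
        congr 1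
        omega
      rw [hexp]
      by_cases hc : c == "#" <;> simp only [hc] <;> norm_num <;> nlinarith [hpow]

-- ===== VERDICT (by name: the statement is the Claim_ definition above) =====
theorem edgeValRightToLeft_spec : Claim_equal_edgeValRightToLeft := by
  intro xs _
  unfold Spec_edgeValRightToLeft edgeValRightToLeft edgeValRightToLeft_alt pvParseBin
  cases xs with
  | nil => simp
  | cons c t =>
    rw [parse_map]
    rw [a_fold_eq (c :: t) 0 ((c :: t).length - 1) (by simp)]
    simp
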